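-- pv_equiv track=rewrite | github.com/rise-hash/matrix-mod-inverse | app.py | get_algebraic_cofactor
-- ===== SOURCE A (Python) =====
-- def calculate_determinant(a, m):
--     """计算行列式的值（模m）"""
--     leng = len(a)
--     if leng == 2:
--         return (a[0][0] * a[1][1] - a[0][1] * a[1][0]) % m
--     if leng == 1:
--         return a[0][0] % m
--     if leng == 0:
--         return None
--
--     add, sub = 0, 0
--     # 对角线加法
--     for i in range(0, leng):
--         y, x, temp = i, 0, 1
--         for j in range(0, leng):
--             temp *= a[x][y]
--             x += 1
--             x = x % leng
--             y += 1
--             y = y % leng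
--         add += temp
--     # 反对角线减法
--     for i in range(leng - 1, -1, -1):
--         y, x, temp = i, 0, 1
--         for j in range(0, leng):
--             temp *= a[x][y]
--             x -= 1
--             x = x % leng
--             y += 1
--             y = y % leng
--         sub -= temp
--     return (sub + add) % m
--
-- def get_algebraic_cofactor(matrix, x, y, d_invert, m):
--     """求代数余子式，返回值的模逆"""
--     leng = len(matrix)
--     ans = []
--     for i in range(0, leng):
--         row = []
--         if i == x:
--             continue
--         for j in range(0, leng):
--             if j == y:
--                 continue
--             row.append(matrix[i][j])
--         ans.append(row)
--     d = (-1) ** (x + y) * calculate_determinant(ans, m)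
--     return (d_invert * d) % m
-- ===== SOURCE B (Python) =====
-- def get_algebraic_cofactor(matrix, x, y, d_invert, m):
--     """Cofactor mod m: same minor, but the determinant's general case is a
--     single row-major pass keeping per-diagonal running products."""
--     n = len(matrix)
--     minor = [[matrix[i][j] for j in range(n) if j != y]
--              for i in range(n) if i != x]
--     k = len(minor)
--     if k == 2:
--         d = (minor[0][0] * minor[1][1] - minor[0][1] * minor[1][0]) % m
--     elif k == 1:
--         d = minor[0][0] % m
--     else:
--         add_prod = [1] * k
--         sub_prod = [1] * k
--         for r in range(k):
--             row = minor[r]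
--             for c in range(k):
--                 v = row[c]
--                 add_prod[(c - r) % k] *= v
--                 sub_prod[(c + r) % k] *= v
--         d = (sum(add_prod) - sum(sub_prod)) % m
--     return (d_invert * ((-1) ** (x + y)) * d) % m
-- ===== Notes on version B (the rewrite author's own statement) =====
-- stated objective: alternative
-- what changed: The determinant's general case no longer walks each wrap-around diagonal with its own (x,y) index-stepping loop pair; instead one row-major pass over the minor maintains two length-n lists of per-diagonal running products (indexed (c-r)%n and (c+r)%n) and the result is (sum(add)-sum(sub))%m; the minor is built by comprehension.
import Mathlib
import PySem

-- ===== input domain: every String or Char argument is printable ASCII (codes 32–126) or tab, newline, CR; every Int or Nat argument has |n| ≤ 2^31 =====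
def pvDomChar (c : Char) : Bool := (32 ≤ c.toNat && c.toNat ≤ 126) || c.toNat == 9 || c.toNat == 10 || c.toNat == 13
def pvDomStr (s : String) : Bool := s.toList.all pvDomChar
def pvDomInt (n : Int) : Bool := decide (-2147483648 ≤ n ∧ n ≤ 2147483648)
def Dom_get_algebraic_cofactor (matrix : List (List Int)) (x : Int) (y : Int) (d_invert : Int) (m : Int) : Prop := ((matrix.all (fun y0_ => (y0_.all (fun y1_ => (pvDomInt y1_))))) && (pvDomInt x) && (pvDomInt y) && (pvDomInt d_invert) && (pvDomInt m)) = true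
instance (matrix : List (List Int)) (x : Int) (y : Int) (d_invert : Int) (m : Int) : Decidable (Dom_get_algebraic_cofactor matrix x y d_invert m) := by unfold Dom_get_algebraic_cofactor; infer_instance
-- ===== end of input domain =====

-- B keeps the minor/sign wrapper but replaces the determinant's two diagonal-walk
-- loops by one row-major pass with per-diagonal running products (objective: alternative).

-- ===== PORT A =====
-- a[x][y], total form; Pre_ guarantees every index Python touches is in range
def entryA (a : List (List Int)) (r c : Int) : Int :=
  PySem.List.pyGetD (PySem.List.pyGetD a r []) c 0

-- calculate_determinant(a, m); Python returns None for len(a)==0 (the caller then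
-- raises TypeError): that case is excluded by Pre_, the port returns 0 there.
def calcDetA (a : List (List Int)) (m : Int) : Int :=
  let leng : Int := PySem.List.len a
  if leng = 2 then
    PySem.Int.mod (entryA a 0 0 * entryA a 1 1 - entryA a 0 1 * entryA a 1 0) m
  else if leng = 1 then
    PySem.Int.mod (entryA a 0 0) m
  else if leng = 0 then
    0
  else
    let add : Int := (PySem.List.pyRange 0 leng 1).foldl (fun add i =>
      let st := (PySem.List.pyRange 0 leng 1).foldl (fun (st : Int × Int × Int) _j =>
        let temp := st.2.2 * entryA a st.2.1 st.1
        let x := PySem.Int.mod (st.2.1 + 1) leng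
        let yy := PySem.Int.mod (st.1 + 1) leng
        (yy, x, temp)) (i, 0, 1)
      add + st.2.2) 0
    let sub : Int := (PySem.List.pyRange (leng - 1) (-1) (-1)).foldl (fun sub i =>
      let st := (PySem.List.pyRange 0 leng 1).foldl (fun (st : Int × Int × Int) _j =>
        let temp := st.2.2 * entryA a st.2.1 st.1
        let x := PySem.Int.mod (st.2.1 - 1) leng
        let yy := PySem.Int.mod (st.1 + 1) leng
        (yy, x, temp)) (i, 0, 1)
      sub - st.2.2) 0
    PySem.Int.mod (sub + add) m

def get_algebraic_cofactor (matrix : List (List Int)) (x : Int) (y : Int) (d_invert : Int) (m : Int) : Int :=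
  let leng : Int := PySem.List.len matrix
  let ans : List (List Int) := (PySem.List.pyRange 0 leng 1).foldl (fun ans i =>
    if i = x then ans
    else
      let row : List Int := (PySem.List.pyRange 0 leng 1).foldl (fun row j =>
        if j = y then row else row ++ [entryA matrix i j]) []
      ans ++ [row]) []
  let d : Int := (-1) ^ (x + y).toNat * calcDetA ans m
  PySem.Int.mod (d_invert * d) m

-- ===== PORT B =====
def entryB (a : List (List Int)) (r c : Int) : Int :=
  PySem.List.pyGetD (PySem.List.pyGetD a r []) c 0

def calcDetB (a : List (List Int)) (m : Int) : Int :=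
  let k : Int := PySem.List.len a
  if k = 2 then
    PySem.Int.mod (entryB a 0 0 * entryB a 1 1 - entryB a 0 1 * entryB a 1 0) m
  else if k = 1 then
    PySem.Int.mod (entryB a 0 0) m
  else
    let st := (PySem.List.pyRange 0 k 1).foldl (fun (st : List Int × List Int) r =>
      let row := PySem.List.pyGetD a r []
      (PySem.List.pyRange 0 k 1).foldl (fun (st2 : List Int × List Int) c =>
        let v := PySem.List.pyGetD row c 0
        let di := PySem.Int.mod (c - r) k
        let dj := PySem.Int.mod (c + r) k
        (PySem.List.pySetD st2.1 di (PySem.List.pyGetD st2.1 di 0 * v),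
         PySem.List.pySetD st2.2 dj (PySem.List.pyGetD st2.2 dj 0 * v))) st)
      (List.replicate k.toNat 1, List.replicate k.toNat 1)
    PySem.Int.mod (st.1.sum - st.2.sum) m

def get_algebraic_cofactor_alt (matrix : List (List Int)) (x : Int) (y : Int) (d_invert : Int) (m : Int) : Int :=
  let n : Int := PySem.List.len matrix
  let minor : List (List Int) :=
    ((PySem.List.pyRange 0 n 1).filter (fun i => i ≠ x)).map (fun i =>
      ((PySem.List.pyRange 0 n 1).filter (fun j => j ≠ y)).map (fun j => entryB matrix i j))
  PySem.Int.mod (d_invert * ((-1) ^ (x + y).toNat * calcDetB minor m)) m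

-- ===== PRECONDITION & SPEC =====
-- Pre_ is exactly the domain on which Python A returns an int (checked empirically
-- against A): m ≠ 0 (else ZeroDivisionError), x + y ≥ 0 (else (-1)**(x+y) is a float
-- and the result leaves int), the minor is nonempty and its rows are long enough for
-- every index the minor-building and determinant loops touch (else TypeError on the
-- empty minor or IndexError on short rows).
def Pre_get_algebraic_cofactor (matrix : List (List Int)) (x : Int) (y : Int) (d_invert : Int) (m : Int) : Prop :=
  m ≠ 0 ∧ 0 ≤ x + y ∧
  ((0 ≤ y ∧ y < (matrix.length : Int)) → (0 ≤ x ∧ x < (matrix.length : Int))) ∧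
  ((0 ≤ x ∧ x < (matrix.length : Int)) → 2 ≤ matrix.length) ∧
  (¬(0 ≤ x ∧ x < (matrix.length : Int)) → 1 ≤ matrix.length) ∧
  (∀ p ∈ matrix.zipIdx, (p.2 : Int) ≠ x →
    (if y = (matrix.length : Int) - 1 then matrix.length - 1 else matrix.length) ≤ p.1.length)

instance (matrix : List (List Int)) (x : Int) (y : Int) (d_invert : Int) (m : Int) : Decidable (Pre_get_algebraic_cofactor matrix x y d_invert m) := by unfold Pre_get_algebraic_cofactor; infer_instance

def pvWitness_get_algebraic_cofactor : List (List Int) × Int × Int × Int × Int :=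
  ([[1, 2, 3], [4, 5, 6], [7, 8, 10]], 1, 2, 3, 7)

def Spec_get_algebraic_cofactor (matrix : List (List Int)) (x : Int) (y : Int) (d_invert : Int) (m : Int) (out : Int) : Prop := out = get_algebraic_cofactor_alt matrix x y d_invert m
instance (matrix : List (List Int)) (x : Int) (y : Int) (d_invert : Int) (m : Int) (out : Int) : Decidable (Spec_get_algebraic_cofactor matrix x y d_invert m out) := by unfold Spec_get_algebraic_cofactor; infer_instance

-- ===== CLAIM (what is proved, stated in full; the proofs are below) =====
def Claim_equal_get_algebraic_cofactor : Prop := ∀ (matrix : List (List Int)) (x : Int) (y : Int) (d_invert : Int) (m : Int), Dom_get_algebraic_cofactor matrix x y d_invert m → Pre_get_algebraic_cofactor matrix x y d_invert m → Spec_get_algebraic_cofactor matrix x y d_invert m (get_algebraic_cofactor matrix x y d_invert m)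

-- ===== LEMMAS AND PROOFS =====
-- arithmetic helpers
theorem pv_neg_emod (a n : Int) : (-(a % n)) % n = (-a) % n := by
  have h1 : (0 - a % n) % n = (0 - a) % n := by
    conv_rhs => rw [Int.sub_emod]
    rw [Int.sub_emod 0 (a % n)]
    simp [Int.emod_emod_of_dvd]
  simpa using h1

theorem pv_sub_emod_right (b a n : Int) : (b - a % n) % n = (b - a) % n := by
  conv_rhs => rw [Int.sub_emod]
  rw [Int.sub_emod b (a % n)]
  simp [Int.emod_emod_of_dvd]

theorem pv_shift_iff (d r c n : Int) (hn : 0 < n) (hd : 0 ≤ d) (hdn : d < n)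
    (hc : 0 ≤ c) (hcn : c < n) : (d + r) % n = c ↔ d = (c - r) % n := by
  constructor
  · intro h
    have : (c - r) % n = ((d + r) % n - r) % n := by rw [h]
    rw [Int.emod_sub_emod, add_sub_cancel_right, Int.emod_eq_of_lt hd hdn] at this
    omega
  · intro h
    rw [h, Int.emod_add_emod, sub_add_cancel, Int.emod_eq_of_lt hc hcn]

theorem innerA_add (a : List (List Int)) (n : Int) (hn : 0 < n) (t : Nat)
    (i x0 temp0 : Int) (hi0 : 0 ≤ i) (hin : i < n) (hx0 : 0 ≤ x0) (hxn : x0 < n) :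
    (PySem.List.pyRange 0 (t : Int) 1).foldl
      (fun (st : Int × Int × Int) _j =>
        ((st.1 + 1) % n, (st.2.1 + 1) % n, st.2.2 * entryA a st.2.1 st.1)) (i, x0, temp0)
    = ((i + t) % n, (x0 + t) % n,
       temp0 * ∏ j ∈ Finset.range t, entryA a ((x0 + j) % n) ((i + j) % n)) := by
  induction t with
  | zero => simp [Int.emod_eq_of_lt hi0 hin, Int.emod_eq_of_lt hx0 hxn]
  | succ t ih =>
    have hcast : ((t + 1 : Nat) : Int) = (t : Int) + 1 := by push_cast; ring
    rw [hcast, PySem.List.pyRange_one_succ_right (by positivity), List.foldl_append, ih]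
    simp only [List.foldl_cons, List.foldl_nil, Finset.prod_range_succ]
    refine Prod.ext ?_ (Prod.ext ?_ ?_) <;> simp [Int.emod_add_emod, mul_assoc]
    · ring_nf
    · ring_nf

theorem innerA_sub (a : List (List Int)) (n : Int) (hn : 0 < n) (t : Nat)
    (i x0 temp0 : Int) (hi0 : 0 ≤ i) (hin : i < n) (hx0 : 0 ≤ x0) (hxn : x0 < n) :
    (PySem.List.pyRange 0 (t : Int) 1).foldl
      (fun (st : Int × Int × Int) _j =>
        ((st.1 + 1) % n, (st.2.1 - 1) % n, st.2.2 * entryA a st.2.1 st.1)) (i, x0, temp0)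
    = ((i + t) % n, (x0 - t) % n,
       temp0 * ∏ j ∈ Finset.range t, entryA a ((x0 - j) % n) ((i + j) % n)) := by
  induction t with
  | zero => simp [Int.emod_eq_of_lt hi0 hin, Int.emod_eq_of_lt hx0 hxn]
  | succ t ih =>
    have hcast : ((t + 1 : Nat) : Int) = (t : Int) + 1 := by push_cast; ring
    rw [hcast, PySem.List.pyRange_one_succ_right (by positivity), List.foldl_append, ih]
    simp only [List.foldl_cons, List.foldl_nil, Finset.prod_range_succ]
    refine Prod.ext ?_ (Prod.ext ?_ ?_) <;>
      simp [Int.emod_add_emod, Int.emod_sub_emod, mul_assoc]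
    · ring_nf
    · ring_nf

def Pd (a : List (List Int)) (i : Int) : Int :=
  ∏ j ∈ Finset.range a.length, entryA a (j : Int) ((i + j) % (a.length : Int))

def Qd (a : List (List Int)) (i : Int) : Int :=
  ∏ j ∈ Finset.range a.length, entryA a (j : Int) ((i - j) % (a.length : Int))

theorem Qreindex (a : List (List Int)) (hn : 0 < a.length) (i : Int) :
    (∏ j ∈ Finset.range a.length,
      entryA a ((-(j : Int)) % (a.length : Int)) ((i + j) % (a.length : Int))) = Qd a i := by
  set n : Int := (a.length : Int) with hdefn
  have hn' : (0 : Int) < n := by omega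
  have hinv : ∀ j : Nat, j < a.length → (((-(((-(j : Int)) % n).toNat : Int)) % n).toNat) = j := by
    intro j hj
    have h0 : (0:Int) ≤ (-(j:Int)) % n := Int.emod_nonneg _ (by omega)
    rw [Int.toNat_of_nonneg h0, pv_neg_emod]
    have : (j:Int) < n := by omega
    rw [neg_neg, Int.emod_eq_of_lt (by omega) this]
    omega
  unfold Qd
  refine Finset.prod_nbij' (fun j => ((-(j : Int)) % n).toNat)
    (fun r => ((-(r : Int)) % n).toNat) ?_ ?_ ?_ ?_ ?_
  · intro j hj
    simp only [Finset.mem_range] at *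
    have h1 : (-(j:Int)) % n < n := Int.emod_lt_of_pos _ hn'
    omega
  · intro r hr
    simp only [Finset.mem_range] at *
    have h1 : (-(r:Int)) % n < n := Int.emod_lt_of_pos _ hn'
    omega
  · intro j hj; exact hinv j (Finset.mem_range.mp hj)
  · intro r hr; exact hinv r (Finset.mem_range.mp hr)
  · intro j hj
    simp only [Finset.mem_range] at hj
    have h0 : (0:Int) ≤ (-(j:Int)) % n := Int.emod_nonneg _ (by omega)
    rw [Int.toNat_of_nonneg h0, pv_sub_emod_right, sub_neg_eq_add]

theorem list_sum_range (n : Nat) (f : Nat → Int) :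
    ((List.range n).map f).sum = ∑ i ∈ Finset.range n, f i := by
  induction n with
  | zero => simp
  | succ k ih => simp [List.range_succ, Finset.sum_range_succ, ih]

theorem foldl_sub_eq (l : List Int) (g : Int → Int) (a : Int) :
    l.foldl (fun acc x => acc - g x) a = a - (l.map g).sum := by
  induction l generalizing a with
  | nil => simp
  | cons x xs ih => simp [ih, sub_sub]

theorem A_add_eq (a : List (List Int)) (hn : 0 < a.length) :
    (PySem.List.pyRange 0 (a.length : Int) 1).foldl (fun add i =>
      add + ((PySem.List.pyRange 0 (a.length : Int) 1).foldl (fun (st : Int × Int × Int) _j =>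
        ((st.1 + 1) % (a.length : Int), (st.2.1 + 1) % (a.length : Int),
          st.2.2 * entryA a st.2.1 st.1)) (i, 0, 1)).2.2) 0
    = ∑ d ∈ Finset.range a.length, Pd a (d : Int) := by
  rw [PySem.List.foldl_add, zero_add]
  have hmap : ∀ i ∈ PySem.List.pyRange 0 (a.length : Int) 1,
      ((PySem.List.pyRange 0 (a.length : Int) 1).foldl (fun (st : Int × Int × Int) _j =>
        ((st.1 + 1) % (a.length : Int), (st.2.1 + 1) % (a.length : Int),
          st.2.2 * entryA a st.2.1 st.1)) (i, 0, 1)).2.2 = Pd a i := by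
    intro i hi
    rw [PySem.List.mem_pyRange_one] at hi
    rw [innerA_add a _ (by exact_mod_cast hn) a.length i 0 1 hi.1 hi.2 le_rfl
      (by exact_mod_cast hn)]
    simp only [one_mul, zero_add]
    refine Finset.prod_congr rfl ?_
    intro j hj
    simp only [Finset.mem_range] at hj
    rw [Int.emod_eq_of_lt (by positivity) (by exact_mod_cast hj)]
  rw [List.map_congr_left hmap, PySem.List.pyRange_zero_nat a.length, List.map_map,
    list_sum_range]
  rfl

theorem A_sub_eq (a : List (List Int)) (hn : 0 < a.length) :
    (PySem.List.pyRange ((a.length : Int) - 1) (-1) (-1)).foldl (fun sub i =>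
      sub - ((PySem.List.pyRange 0 (a.length : Int) 1).foldl (fun (st : Int × Int × Int) _j =>
        ((st.1 + 1) % (a.length : Int), (st.2.1 - 1) % (a.length : Int),
          st.2.2 * entryA a st.2.1 st.1)) (i, 0, 1)).2.2) 0
    = -∑ d ∈ Finset.range a.length, Qd a (d : Int) := by
  have hrev : PySem.List.pyRange ((a.length : Int) - 1) (-1) (-1)
      = (PySem.List.pyRange 0 (a.length : Int) 1).reverse := by
    rw [PySem.List.pyRange_neg_one_eq_reverse]
    norm_num
  rw [hrev, foldl_sub_eq, zero_sub, neg_inj, List.map_reverse, List.sum_reverse]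
  have hmap : ∀ i ∈ PySem.List.pyRange 0 (a.length : Int) 1,
      ((PySem.List.pyRange 0 (a.length : Int) 1).foldl (fun (st : Int × Int × Int) _j =>
        ((st.1 + 1) % (a.length : Int), (st.2.1 - 1) % (a.length : Int),
          st.2.2 * entryA a st.2.1 st.1)) (i, 0, 1)).2.2 = Qd a i := by
    intro i hi
    rw [PySem.List.mem_pyRange_one] at hi
    rw [innerA_sub a _ (by exact_mod_cast hn) a.length i 0 1 hi.1 hi.2 le_rfl
      (by exact_mod_cast hn)]
    simp only [one_mul]
    rw [← Qreindex a hn i]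
    refine Finset.prod_congr rfl ?_
    intro j hj
    rw [zero_sub]
  rw [List.map_congr_left hmap, PySem.List.pyRange_zero_nat a.length, List.map_map,
    list_sum_range]
  rfl

theorem pv_getD_map_range (k : Nat) (g : Nat → Int) (i : Int) (h0 : 0 ≤ i) (h1 : i < (k : Int)) :
    PySem.List.pyGetD ((List.range k).map g) i 0 = g i.toNat := by
  rw [PySem.List.pyGetD_eq_getElem _ _ h0 (by simpa using h1)]
  simp [List.getElem_map, List.getElem_range]

theorem pv_setD_map_range (k : Nat) (g : Nat → Int) (i : Int) (v : Int)
    (h0 : 0 ≤ i) (h1 : i < (k : Int)) :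
    PySem.List.pySetD ((List.range k).map g) i v
      = (List.range k).map (fun d => if d = i.toNat then v else g d) := by
  rw [PySem.List.pySetD_of_nonneg _ _ h0]
  apply List.ext_getElem
  · simp
  · intro j hj hj'
    simp only [List.getElem_set, List.getElem_map, List.getElem_range]
    by_cases h : i.toNat = j
    · simp [h]
    · simp [h, Ne.symm h]

theorem innerB (a : List (List Int)) (hn : 0 < a.length) (r : Int) (hr0 : 0 ≤ r)
    (hrn : r < (a.length : Int)) (g1 g2 : Nat → Int) (c : Nat) (hc : c ≤ a.length) :
    (PySem.List.pyRange 0 (c : Int) 1).foldl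
      (fun (st2 : List Int × List Int) c =>
        (PySem.List.pySetD st2.1 ((c - r) % (a.length : Int))
          (PySem.List.pyGetD st2.1 ((c - r) % (a.length : Int)) 0 *
            PySem.List.pyGetD (PySem.List.pyGetD a r []) c 0),
         PySem.List.pySetD st2.2 ((c + r) % (a.length : Int))
          (PySem.List.pyGetD st2.2 ((c + r) % (a.length : Int)) 0 *
            PySem.List.pyGetD (PySem.List.pyGetD a r []) c 0)))
      ((List.range a.length).map g1, (List.range a.length).map g2)
    = ((List.range a.length).map (fun (d : Nat) =>
        if ((d : Int) + r) % (a.length : Int) < (c : Int)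
        then g1 d * entryA a r (((d : Int) + r) % (a.length : Int)) else g1 d),
       (List.range a.length).map (fun (d : Nat) =>
        if ((d : Int) - r) % (a.length : Int) < (c : Int)
        then g2 d * entryA a r (((d : Int) - r) % (a.length : Int)) else g2 d)) := by
  set n : Int := (a.length : Int) with hdefn
  have hn' : (0 : Int) < n := by omega
  induction c with
  | zero =>
    simp only [Nat.cast_zero, PySem.List.pyRange_one_eq_nil le_rfl, List.foldl_nil]
    refine Prod.ext ?_ ?_ <;> simp only []
    · exact (List.map_congr_left (fun d _ => by
        simp [not_lt.2 (Int.emod_nonneg ((d : Int) + r) (by omega : n ≠ 0))])).symm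
    · exact (List.map_congr_left (fun d _ => by
        simp [not_lt.2 (Int.emod_nonneg ((d : Int) - r) (by omega : n ≠ 0))])).symm
  | succ c ih =>
    have hc' : c ≤ a.length := by omega
    have hclt : (c : Int) < n := by omega
    have hc0 : (0 : Int) ≤ (c : Int) := by positivity
    have hcast : ((c + 1 : Nat) : Int) = (c : Int) + 1 := by push_cast; ring
    rw [hcast, PySem.List.pyRange_one_succ_right (by positivity), List.foldl_append, ih hc',
      List.foldl_cons, List.foldl_nil]
    have hE : PySem.List.pyGetD (PySem.List.pyGetD a r []) (c : Int) 0 = entryA a r (c : Int) := rfl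
    refine Prod.ext ?_ ?_ <;> simp only []
    · -- add_prod component
      have hp0 : (0:Int) ≤ ((c : Int) - r) % n := Int.emod_nonneg _ (by omega)
      have hpn : ((c : Int) - r) % n < n := Int.emod_lt_of_pos _ hn'
      rw [pv_getD_map_range _ _ _ hp0 (by omega), pv_setD_map_range _ _ _ _ hp0 (by omega)]
      refine List.map_congr_left ?_
      intro d hd
      simp only [List.mem_range] at hd
      have hd0 : (0:Int) ≤ (d:Int) := by positivity
      have hdn : (d:Int) < n := by omega
      have hiff : ((d : Int) + r) % n = (c : Int) ↔ (d : Int) = ((c:Int) - r) % n :=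
        pv_shift_iff _ r _ n hn' hd0 hdn hc0 hclt
      have hu0 : (0:Int) ≤ ((d : Int) + r) % n := Int.emod_nonneg _ (by omega)
      have hun : ((d : Int) + r) % n < n := Int.emod_lt_of_pos _ hn'
      have hdiff : d = (((c:Int) - r) % n).toNat ↔ ((d : Int) + r) % n = (c : Int) := by
        rw [hiff]; omega
      by_cases hcase : ((d : Int) + r) % n = (c : Int)
      · have hd' : d = (((c:Int) - r) % n).toNat := hdiff.mpr hcase
        rw [if_pos hd', ← hd',
          if_neg (show ¬ (((d : Int) + r) % n < (c : Int)) by omega),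
          if_pos (show ((d : Int) + r) % n < (c : Int) + 1 by omega), hcase, hE]
      · rw [if_neg (fun h => hcase (hdiff.mp h))]
        by_cases hlt : ((d : Int) + r) % n < (c : Int)
        · rw [if_pos hlt, if_pos (by omega)]
        · rw [if_neg hlt, if_neg (by omega)]
    · -- sub_prod component
      have hp0 : (0:Int) ≤ ((c : Int) + r) % n := Int.emod_nonneg _ (by omega)
      have hpn : ((c : Int) + r) % n < n := Int.emod_lt_of_pos _ hn'
      rw [pv_getD_map_range _ _ _ hp0 (by omega), pv_setD_map_range _ _ _ _ hp0 (by omega)]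
      refine List.map_congr_left ?_
      intro d hd
      simp only [List.mem_range] at hd
      have hd0 : (0:Int) ≤ (d:Int) := by positivity
      have hdn : (d:Int) < n := by omega
      have hiff : ((d : Int) - r) % n = (c : Int) ↔ (d : Int) = ((c:Int) + r) % n := by
        have := pv_shift_iff (d : Int) (-r) (c : Int) n hn' hd0 hdn hc0 hclt
        rwa [← sub_eq_add_neg, sub_neg_eq_add] at this
      have hu0 : (0:Int) ≤ ((d : Int) - r) % n := Int.emod_nonneg _ (by omega)
      have hun : ((d : Int) - r) % n < n := Int.emod_lt_of_pos _ hn'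
      have hdiff : d = (((c:Int) + r) % n).toNat ↔ ((d : Int) - r) % n = (c : Int) := by
        rw [hiff]; omega
      by_cases hcase : ((d : Int) - r) % n = (c : Int)
      · have hd' : d = (((c:Int) + r) % n).toNat := hdiff.mpr hcase
        rw [if_pos hd', ← hd',
          if_neg (show ¬ (((d : Int) - r) % n < (c : Int)) by omega),
          if_pos (show ((d : Int) - r) % n < (c : Int) + 1 by omega), hcase, hE]
      · rw [if_neg (fun h => hcase (hdiff.mp h))]
        by_cases hlt : ((d : Int) - r) % n < (c : Int)
        · rw [if_pos hlt, if_pos (by omega)]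
        · rw [if_neg hlt, if_neg (by omega)]

theorem pv_replicate_one (k : Nat) : (List.range k).map (fun _ => (1 : Int)) = List.replicate k 1 := by
  simp

theorem outerB (a : List (List Int)) (hn : 0 < a.length) (t : Nat) (ht : t ≤ a.length) :
    (PySem.List.pyRange 0 (t : Int) 1).foldl
      (fun (st : List Int × List Int) r =>
        (PySem.List.pyRange 0 (a.length : Int) 1).foldl
          (fun (st2 : List Int × List Int) c =>
            (PySem.List.pySetD st2.1 ((c - r) % (a.length : Int))
              (PySem.List.pyGetD st2.1 ((c - r) % (a.length : Int)) 0 *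
                PySem.List.pyGetD (PySem.List.pyGetD a r []) c 0),
             PySem.List.pySetD st2.2 ((c + r) % (a.length : Int))
              (PySem.List.pyGetD st2.2 ((c + r) % (a.length : Int)) 0 *
                PySem.List.pyGetD (PySem.List.pyGetD a r []) c 0))) st)
      (List.replicate a.length 1, List.replicate a.length 1)
    = ((List.range a.length).map (fun (d : Nat) =>
        ∏ r ∈ Finset.range t, entryA a (r : Int) (((d : Int) + (r : Int)) % (a.length : Int))),
       (List.range a.length).map (fun (d : Nat) =>
        ∏ r ∈ Finset.range t, entryA a (r : Int) (((d : Int) - (r : Int)) % (a.length : Int)))) := by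
  induction t with
  | zero =>
    simp only [Nat.cast_zero, PySem.List.pyRange_one_eq_nil le_rfl, List.foldl_nil,
      Finset.prod_range_zero, pv_replicate_one]
  | succ t ih =>
    have ht' : t ≤ a.length := by omega
    have hcast : ((t + 1 : Nat) : Int) = (t : Int) + 1 := by push_cast; ring
    rw [hcast, PySem.List.pyRange_one_succ_right (by positivity), List.foldl_append,
      ih ht', List.foldl_cons, List.foldl_nil]
    rw [innerB a hn (t : Int) (by positivity) (by exact_mod_cast (by omega : t < a.length))
      _ _ a.length le_rfl]
    have hn' : (0 : Int) < (a.length : Int) := by exact_mod_cast hn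
    refine Prod.ext ?_ ?_ <;> simp only [] <;> refine List.map_congr_left ?_ <;>
      intro d hd <;>
      rw [if_pos (Int.emod_lt_of_pos _ hn'), Finset.prod_range_succ]

theorem entry_eq : entryB = entryA := rfl

theorem det_eq (a : List (List Int)) (m : Int) (h : 1 ≤ a.length) :
    calcDetA a m = calcDetB a m := by
  unfold calcDetA calcDetB
  simp only [PySem.List.len_eq, entry_eq, Int.toNat_natCast]
  by_cases h2 : ((a.length : Nat) : Int) = 2
  · simp [h2]
  · rw [if_neg h2, if_neg h2]
    by_cases h1 : ((a.length : Nat) : Int) = 1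
    · rw [if_pos h1, if_pos h1]
    · rw [if_neg h1, if_neg h1]
      have h0 : ¬ ((a.length : Nat) : Int) = 0 := by omega
      rw [if_neg h0]
      have hn : 0 < a.length := h
      have hn' : (0 : Int) < (a.length : Int) := by exact_mod_cast hn
      simp only [PySem.Int.mod_eq_emod_of_pos hn']
      rw [A_add_eq a hn, A_sub_eq a hn, outerB a hn a.length le_rfl]
      simp only [list_sum_range, Pd, Qd]
      rw [neg_add_eq_sub]

theorem foldl_skip_eq_filter_map {β : Type} (x : Int) (f : Int → β) (l : List Int) :
    l.foldl (fun acc i => if i = x then acc else acc ++ [f i]) []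
      = (l.filter (fun i => i ≠ x)).map f := by
  have hfun : (fun (acc : List β) i => if i = x then acc else acc ++ [f i])
      = fun acc i => if (fun i => (decide (i ≠ x))) i = true then acc ++ [f i] else acc := by
    funext acc i
    by_cases hi : i = x <;> simp [hi]
  rw [hfun, PySem.List.foldl_append_if]
  simp


theorem main_eq (matrix : List (List Int)) (x y d_invert m : Int)
    (hPre : Pre_get_algebraic_cofactor matrix x y d_invert m) :
    get_algebraic_cofactor matrix x y d_invert m = get_algebraic_cofactor_alt matrix x y d_invert m := by
  obtain ⟨hm, hxy, hyx, hx2, hx1, hrows⟩ := hPre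
  have hN1 : 1 ≤ matrix.length := by
    by_cases hxin : 0 ≤ x ∧ x < (matrix.length : Int)
    · have := hx2 hxin; omega
    · exact hx1 hxin
  have hx0 : x = 0 → 2 ≤ matrix.length := by
    intro h0
    subst h0
    by_cases hxin : (0:Int) ≤ 0 ∧ (0:Int) < (matrix.length : Int)
    · exact hx2 hxin
    · exfalso
      have := hx1 hxin
      omega
  unfold get_algebraic_cofactor get_algebraic_cofactor_alt
  simp only [PySem.List.len_eq, entry_eq, foldl_skip_eq_filter_map]
  set M : List (List Int) := ((PySem.List.pyRange 0 (matrix.length : Int) 1).filter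
    (fun i => i ≠ x)).map (fun i =>
      ((PySem.List.pyRange 0 (matrix.length : Int) 1).filter (fun j => j ≠ y)).map
        (fun j => entryA matrix i j)) with hM
  have hlen : 1 ≤ M.length := by
    have hmem : (if x = 0 then (1:Int) else 0) ∈ (PySem.List.pyRange 0 (matrix.length : Int) 1).filter (fun i => i ≠ x) := by
      rw [List.mem_filter, PySem.List.mem_pyRange_one]
      by_cases hx : x = 0
      · have := hx0 hx
        simp [hx]
        omega
      · simp [hx]
        omega
    have hne : M ≠ [] := by
      rw [hM]
      intro hnil
      have hfil := List.map_eq_nil_iff.mp hnil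
      rw [hfil] at hmem
      exact List.not_mem_nil hmem
    have := List.length_pos_iff.mpr hne
    omega
  rw [det_eq M m hlen]

-- ===== VERDICT (by name: the statement is the Claim_ definition above) =====
theorem get_algebraic_cofactor_spec : Claim_equal_get_algebraic_cofactor := by
  intro matrix x y d_invert m _hDom hPre
  unfold Spec_get_algebraic_cofactor
  exact main_eq matrix x y d_invert m hPre
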